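-- pv_equiv track=rewrite | github.com/bmenrigh/everybody_codes_2024 | 07/solve_b.py | score_track
-- ===== SOURCE A (Python) =====
-- def score_track(maintrack, track, p, l):
--
--     score = 0
--     tlen = len(track)
--     mtlen = len(maintrack)
--
--     for i in range(l * mtlen):
--         t_op = maintrack[i % mtlen]
--
--         if t_op == "S" or t_op == "=":
--             t_op = track[i % tlen]
--
--         if t_op == '+':
--             p += 1
--         elif t_op == '-':
--             p -= 1
--             p = max(p, 0)
--
--         score += p
--
--     return score
-- ===== SOURCE B (Python) =====
-- def score_track(maintrack, track, p, l):
--     # Period-based re-implementation: resolve the S/= indirection once over one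
--     # lcm-period of ops, then advance whole periods; once the power value is high
--     # enough that the max(p,0) clamp can never fire and the per-period drift is
--     # nonnegative, the remaining periods' score is a closed-form arithmetic series.
--     mtlen = len(maintrack)
--     tlen = len(track)
--     total = l * mtlen
--     if total <= 0:
--         return 0
--     if tlen == 0:
--         L = mtlen
--     else:
--         a, b = mtlen, tlen
--         while b:
--             a, b = b, a % b
--         L = mtlen * tlen // a
--     ops = []
--     for i in range(L):
--         c = maintrack[i % mtlen]
--         if c == 'S' or c == '=':
--             c = track[i % tlen]
--         ops.append(c)
--     # per-period data for the clamp-free regime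
--     d = 0        # net drift over one period (no clamping)
--     base = 0     # score of one clamp-free period started at p == 0
--     thresh = 0   # p >= thresh ==> no clamp fires during a period
--     run = 0
--     for c in ops:
--         if c == '+':
--             run += 1
--         elif c == '-':
--             if 1 - run > thresh:
--                 thresh = 1 - run
--             run -= 1
--         base += run
--     d = run
--     K, rem = divmod(total, L)
--     score = 0
--     k = 0
--     while k < K and not (p >= thresh and d >= 0):
--         for c in ops:
--             if c == '+':
--                 p += 1
--             elif c == '-':
--                 p -= 1
--                 if p < 0:
--                     p = 0
--             score += p
--         k += 1
--     if k < K: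
--         R = K - k
--         score += R * (L * p + base) + L * d * (R * (R - 1) // 2)
--         p += R * d
--     for c in ops[:rem]:
--         if c == '+':
--             p += 1
--         elif c == '-':
--             p -= 1
--             if p < 0:
--                 p = 0
--         score += p
--     return score
-- ===== Notes on version B (the rewrite author's own statement) =====
-- stated objective: faster
-- what changed: B resolves the S/= indirection once over a single lcm(len(maintrack),len(track)) period of ops, then advances whole periods, and once the power is above a precomputed clamp threshold with nonnegative per-period drift it scores all remaining periods with a closed-form arithmetic series instead of stepping.
import Mathlib
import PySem

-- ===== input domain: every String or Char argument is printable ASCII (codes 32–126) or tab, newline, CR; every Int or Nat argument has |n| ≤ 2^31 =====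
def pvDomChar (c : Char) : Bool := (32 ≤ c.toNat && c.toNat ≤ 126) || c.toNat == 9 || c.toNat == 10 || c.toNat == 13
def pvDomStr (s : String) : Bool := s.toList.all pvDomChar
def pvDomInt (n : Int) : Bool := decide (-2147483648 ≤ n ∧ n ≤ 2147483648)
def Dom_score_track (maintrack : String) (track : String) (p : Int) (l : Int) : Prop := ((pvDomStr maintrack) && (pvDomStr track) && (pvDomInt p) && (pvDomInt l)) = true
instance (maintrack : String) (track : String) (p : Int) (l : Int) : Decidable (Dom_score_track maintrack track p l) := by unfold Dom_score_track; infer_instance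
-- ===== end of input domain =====

-- B re-implements A's per-step simulation by resolving one lcm-period of ops once and
-- advancing period by period, with a closed-form arithmetic series once the clamp can
-- no longer fire; the proof shows the return values agree on all of Pre_.

-- ===== PORT A =====
def score_track (maintrack : String) (track : String) (p : Int) (l : Int) : Int :=
  let score : Int := 0
  let tlen : Int := PySem.Str.len track
  let mtlen : Int := PySem.Str.len maintrack
  let st := (PySem.List.pyRange 0 (l * mtlen) 1).foldl (fun (st : Int × Int) i =>
      -- t_op = maintrack[i % mtlen]  (index in range on every iteration: default unreachable)
      let t_op := (PySem.Str.pyGet? maintrack (PySem.Int.mod i mtlen)).getD ' '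
      -- Python raises here iff tlen = 0: those inputs are excluded by Pre_
      let t_op := if t_op = 'S' ∨ t_op = '=' then (PySem.Str.pyGet? track (PySem.Int.mod i tlen)).getD ' ' else t_op
      let p := if t_op = '+' then st.1 + 1
               else if t_op = '-' then max (st.1 - 1) 0
               else st.1
      (p, st.2 + p)) (p, score)
  st.2

-- ===== PORT B =====
-- loop body of B's `_run` helper
def pvStep (st : Int × Int) (c : Char) : Int × Int :=
  let p := if c = '+' then st.1 + 1
           else if c = '-' then (if st.1 - 1 < 0 then 0 else st.1 - 1)
           else st.1
  (p, st.2 + p)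

-- B's `_run(ops, p, score)`
def pvRun (ops : List Char) (p : Int) (score : Int) : Int × Int :=
  ops.foldl pvStep (p, score)

-- loop body of B's per-period analysis: state (thresh, base, run)
def pvTripleStep (st : Int × Int × Int) (c : Char) : Int × Int × Int :=
  if c = '+' then (st.1, st.2.1 + (st.2.2 + 1), st.2.2 + 1)
  else if c = '-' then
    ((if 1 - st.2.2 > st.1 then 1 - st.2.2 else st.1), st.2.1 + (st.2.2 - 1), st.2.2 - 1)
  else (st.1, st.2.1 + st.2.2, st.2.2)

-- B's Euclid loop `while b: a, b = b, a % b`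
def pvGcdLoop (a : Int) (b : Int) : Int :=
  if h : b ≠ 0 then pvGcdLoop b (PySem.Int.mod a b) else a
termination_by b.natAbs
decreasing_by
  rcases lt_or_gt_of_ne h with hneg | hpos
  · have h1 := (PySem.Int.mod_neg_bounds (a := a) hneg).1
    have h2 := (PySem.Int.mod_neg_bounds (a := a) hneg).2
    omega
  · have h1 := PySem.Int.mod_nonneg (a := a) hpos
    have h2 := PySem.Int.mod_lt (a := a) hpos
    omega

-- B's `while k < K and not (p >= thresh and d >= 0)` loop; returns (k, p, score)
def pvPeriodLoop (ops : List Char) (thresh : Int) (d : Int) (K : Int) (k : Int) (p : Int) (score : Int) : Int × Int × Int :=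
  if h : k < K ∧ ¬(p ≥ thresh ∧ d ≥ 0) then
    let st := pvRun ops p score
    pvPeriodLoop ops thresh d K (k + 1) st.1 st.2
  else (k, p, score)
termination_by (K - k).toNat
decreasing_by omega

def score_track_alt (maintrack : String) (track : String) (p : Int) (l : Int) : Int :=
  let mtlen : Int := PySem.Str.len maintrack
  let tlen : Int := PySem.Str.len track
  let total := l * mtlen
  if total ≤ 0 then 0
  else
    let L := if tlen = 0 then mtlen else PySem.Int.floordiv (mtlen * tlen) (pvGcdLoop mtlen tlen)
    let ops := (PySem.List.pyRange 0 L 1).foldl (fun acc i =>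
        let c := (PySem.Str.pyGet? maintrack (PySem.Int.mod i mtlen)).getD ' '
        let c := if c = 'S' ∨ c = '=' then (PySem.Str.pyGet? track (PySem.Int.mod i tlen)).getD ' ' else c
        acc ++ [c]) []
    let tb := ops.foldl pvTripleStep (0, 0, 0)
    -- divmod(total, L): L ≠ 0 whenever total > 0, so the default is unreachable
    let Kr := (PySem.Int.divmod? total L).getD (0, 0)
    let kps := pvPeriodLoop ops tb.1 tb.2.2 Kr.1 0 p 0
    let pr := if kps.1 < Kr.1 then
        let R := Kr.1 - kps.1
        (kps.2.1 + R * tb.2.2,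
         kps.2.2 + R * (L * kps.2.1 + tb.2.1) + L * tb.2.2 * PySem.Int.floordiv (R * (R - 1)) 2)
      else (kps.2.1, kps.2.2)
    (pvRun (PySem.List.slice ops none (some Kr.2)) pr.1 pr.2).2

-- ===== PRECONDITION & SPEC =====
-- Pre_ excludes exactly the inputs where Python A raises ZeroDivisionError:
-- l > 0, track empty, and maintrack contains an 'S' or '=' that redirects to track.
def Pre_score_track (maintrack : String) (track : String) (p : Int) (l : Int) : Prop :=
  ¬ (0 < l ∧ track = "" ∧ ('S' ∈ maintrack.toList ∨ '=' ∈ maintrack.toList))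
instance (maintrack : String) (track : String) (p : Int) (l : Int) : Decidable (Pre_score_track maintrack track p l) := by unfold Pre_score_track; infer_instance

def pvWitness_score_track : String × String × Int × Int := ("+-S=a", "+-", 3, 4)

def Spec_score_track (maintrack : String) (track : String) (p : Int) (l : Int) (out : Int) : Prop := out = score_track_alt maintrack track p l
instance (maintrack : String) (track : String) (p : Int) (l : Int) (out : Int) : Decidable (Spec_score_track maintrack track p l out) := by unfold Spec_score_track; infer_instance

-- ===== CLAIM (what is proved, stated in full; the proofs are below) =====
def Claim_equal_score_track : Prop := ∀ (maintrack : String) (track : String) (p : Int) (l : Int), Dom_score_track maintrack track p l → Pre_score_track maintrack track p l → Spec_score_track maintrack track p l (score_track maintrack track p l)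

-- ===== LEMMAS AND PROOFS =====

-- the resolved op at step i (shared shape of both ports' lookup code)
def opAt (maintrack : String) (track : String) (i : Int) : Char :=
  let c := (PySem.Str.pyGet? maintrack (PySem.Int.mod i (PySem.Str.len maintrack))).getD ' '
  if c = 'S' ∨ c = '=' then (PySem.Str.pyGet? track (PySem.Int.mod i (PySem.Str.len track))).getD ' ' else c

-- k applications of one full period
def runIter (ops : List Char) : Nat → (Int × Int) → (Int × Int)
  | 0, st => st
  | k + 1, st => runIter ops k (pvRun ops st.1 st.2)

def triInt : Nat → Int
  | 0 => 0
  | n + 1 => triInt n + n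

lemma pvRun_eta (ops : List Char) (st : Int × Int) : pvRun ops st.1 st.2 = ops.foldl pvStep st := by
  cases st; rfl

-- A's loop body is pvStep applied to the resolved op
lemma scoreA_eq (mt tr : String) (p l : Int) :
    score_track mt tr p l
      = (((PySem.List.pyRange 0 (l * PySem.Str.len mt) 1).map (opAt mt tr)).foldl pvStep (p, 0)).2 := by
  unfold score_track
  dsimp only
  rw [List.foldl_map]
  congr 1
  apply List.foldl_ext
  intro st i _
  unfold pvStep opAt
  dsimp only
  by_cases h : (PySem.Str.pyGet? mt (PySem.Int.mod i (PySem.Str.len mt))).getD ' ' = 'S'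
      ∨ (PySem.Str.pyGet? mt (PySem.Int.mod i (PySem.Str.len mt))).getD ' ' = '='
  · rw [if_pos h]
    have hp : ∀ (c : Char), (if c = '+' then st.1 + 1 else if c = '-' then max (st.1 - 1) 0 else st.1)
        = (if c = '+' then st.1 + 1 else if c = '-' then (if st.1 - 1 < 0 then 0 else st.1 - 1) else st.1) := by
      intro c; split_ifs <;> omega
    rw [hp]
  · rw [if_neg h]
    have hp : ∀ (c : Char), (if c = '+' then st.1 + 1 else if c = '-' then max (st.1 - 1) 0 else st.1)
        = (if c = '+' then st.1 + 1 else if c = '-' then (if st.1 - 1 < 0 then 0 else st.1 - 1) else st.1) := by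
      intro c; split_ifs <;> omega
    rw [hp]

lemma gcdLoop_natCast (b a : Nat) : pvGcdLoop (a : Int) (b : Int) = (Nat.gcd a b : Int) := by
  induction b using Nat.strong_induction_on generalizing a with
  | _ b ih =>
    rw [pvGcdLoop]
    by_cases hb : b = 0
    · subst hb; simp
    · rw [dif_pos (by exact_mod_cast hb)]
      rw [PySem.Int.mod_natCast]
      rw [ih (a % b) (Nat.mod_lt a (Nat.pos_of_ne_zero hb)) b]
      rw [Nat.gcd_comm a b, Nat.gcd_rec b a, Nat.gcd_comm (a % b) b]

-- op resolution is periodic mod any common multiple of the two lengths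
lemma opAt_shift (mt tr : String) (a j : Int)
    (hm : 0 < PySem.Str.len mt) (hma : PySem.Str.len mt ∣ a)
    (ht : PySem.Str.len tr = 0 ∨ (0 < PySem.Str.len tr ∧ PySem.Str.len tr ∣ a)) :
    opAt mt tr (a + j) = opAt mt tr j := by
  have hmod : ∀ (m : Int), 0 < m → m ∣ a → PySem.Int.mod (a + j) m = PySem.Int.mod j m := by
    intro m hm0 ⟨k, hk⟩
    rw [PySem.Int.mod_eq_emod_of_pos hm0, PySem.Int.mod_eq_emod_of_pos hm0, hk,
      add_comm, Int.add_mul_emod_self_left]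
  have hnil : ∀ (x : Int), (PySem.List.pyGet? ([] : List Char) x).getD ' ' = ' ' := by
    intro x
    rw [(PySem.List.pyGet?_eq_none_iff _ _).2 (by simp [PySem.Raise.InRange])]
    rfl
  unfold opAt
  rw [hmod _ hm hma]
  rcases ht with h0 | ⟨ht0, htd⟩
  · have htl : tr.toList = [] := by
      rw [PySem.Str.len_eq] at h0
      exact List.length_eq_zero_iff.mp (by exact_mod_cast h0)
    simp only [PySem.Str.pyGet?, htl]
    split_ifs <;> simp [hnil]
  · rw [hmod _ ht0 htd]

lemma seq_shift (mt tr : String) (a c : Int)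
    (hm : 0 < PySem.Str.len mt) (hma : PySem.Str.len mt ∣ a)
    (ht : PySem.Str.len tr = 0 ∨ (0 < PySem.Str.len tr ∧ PySem.Str.len tr ∣ a)) :
    (PySem.List.pyRange a (a + c) 1).map (opAt mt tr) = (PySem.List.pyRange 0 c 1).map (opAt mt tr) := by
  rw [PySem.List.pyRange_one a (a + c), PySem.List.pyRange_one 0 c]
  simp only [List.map_map, add_sub_cancel_left, sub_zero]
  apply List.map_congr_left
  intro k _
  simp only [Function.comp_apply, zero_add]
  have : a + ((k : Int)) = a + k := rfl
  rw [show a + ((k : Int)) = a + (k : Int) from rfl]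
  exact opAt_shift mt tr a k hm hma ht

-- running A's per-step fold over k full periods plus a remainder
lemma run_chunks (mt tr : String) (Lv : Int)
    (hm : 0 < PySem.Str.len mt) (hL : 0 < Lv) (hmL : PySem.Str.len mt ∣ Lv)
    (htL : PySem.Str.len tr = 0 ∨ (0 < PySem.Str.len tr ∧ PySem.Str.len tr ∣ Lv)) :
    ∀ (k : Nat) (r : Int) (st : Int × Int), 0 ≤ r →
      ((PySem.List.pyRange 0 ((k : Int) * Lv + r) 1).map (opAt mt tr)).foldl pvStep st
        = ((PySem.List.pyRange 0 r 1).map (opAt mt tr)).foldl pvStep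
            (runIter ((PySem.List.pyRange 0 Lv 1).map (opAt mt tr)) k st) := by
  intro k
  induction k with
  | zero => intro r st hr; simp [runIter]
  | succ k ih =>
    intro r st hr
    have hX : (0 : Int) ≤ (k : Int) * Lv + r := by positivity
    have hsplit : PySem.List.pyRange 0 (((k : Nat) + 1 : Nat) * Lv + r) 1
        = PySem.List.pyRange 0 Lv 1 ++ PySem.List.pyRange Lv (((k : Nat) + 1 : Nat) * Lv + r) 1 := by
      apply PySem.List.pyRange_one_append 0 Lv _ (le_of_lt hL)
      push_cast
      nlinarith
    rw [hsplit, List.map_append, List.foldl_append]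
    have hshift : (PySem.List.pyRange Lv (((k : Nat) + 1 : Nat) * Lv + r) 1).map (opAt mt tr)
        = (PySem.List.pyRange 0 ((k : Int) * Lv + r) 1).map (opAt mt tr) := by
      have : (((k : Nat) + 1 : Nat) : Int) * Lv + r = Lv + ((k : Int) * Lv + r) := by push_cast; ring
      rw [this]
      exact seq_shift mt tr Lv ((k : Int) * Lv + r) hm (dvd_refl Lv |> fun _ => hmL) (by
        rcases htL with h | ⟨h1, h2⟩
        · exact Or.inl h
        · exact Or.inr ⟨h1, h2⟩)
    rw [hshift, ih r _ hr]
    have : runIter ((PySem.List.pyRange 0 Lv 1).map (opAt mt tr)) (k + 1) st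
        = runIter ((PySem.List.pyRange 0 Lv 1).map (opAt mt tr)) k
            (pvRun ((PySem.List.pyRange 0 Lv 1).map (opAt mt tr)) st.1 st.2) := rfl
    rw [this, pvRun_eta]

-- the thresh component of the analysis fold only ever increases
lemma triple_mono (ops : List Char) : ∀ (st : Int × Int × Int), st.1 ≤ (ops.foldl pvTripleStep st).1 := by
  induction ops with
  | nil => intro st; simp
  | cons c t ih =>
    intro st
    have h1 : st.1 ≤ (pvTripleStep st c).1 := by
      unfold pvTripleStep; split_ifs <;> simp <;> omega
    calc st.1 ≤ (pvTripleStep st c).1 := h1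
      _ ≤ ((c :: t).foldl pvTripleStep st).1 := by rw [List.foldl_cons]; exact ih _

-- a clamp-free period from power q is the unclamped affine run
lemma run_unclamped : ∀ (ops : List Char) (th b r q s : Int),
    (ops.foldl pvTripleStep (th, b, r)).1 ≤ q - r →
    ops.foldl pvStep (q, s)
      = (q + ((ops.foldl pvTripleStep (th, b, r)).2.2 - r),
         s + (q - r) * ops.length + ((ops.foldl pvTripleStep (th, b, r)).2.1 - b)) := by
  intro ops
  induction ops with
  | nil => intro th b r q s _; simp
  | cons c t ih =>
    intro th b r q s hq
    rw [List.foldl_cons, List.foldl_cons] at *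
    by_cases hplus : c = '+'
    · subst hplus
      have hstep : pvStep (q, s) '+' = (q + 1, s + (q + 1)) := by unfold pvStep; simp
      have htriple : pvTripleStep (th, b, r) '+' = (th, b + (r + 1), r + 1) := by
        unfold pvTripleStep; simp
      rw [htriple] at hq
      rw [hstep]
      rw [ih th (b + (r + 1)) (r + 1) (q + 1) (s + (q + 1)) (by omega)]
      rw [htriple]
      apply Prod.ext
      · simp; ring
      · simp; push_cast; ring
    · by_cases hminus : c = '-'
      · subst hminus
        have htriple : pvTripleStep (th, b, r) '-'
            = ((if 1 - r > th then 1 - r else th), b + (r - 1), r - 1) := by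
          unfold pvTripleStep; simp
        have hth1 : (1 : Int) - r ≤ (pvTripleStep (th, b, r) '-').1 := by
          rw [htriple]; split_ifs <;> omega
        have hmono := triple_mono t (pvTripleStep (th, b, r) '-')
        have hq1 : 1 ≤ q := by
          have := le_trans hth1 hmono
          omega
        have hstep : pvStep (q, s) '-' = (q - 1, s + (q - 1)) := by
          unfold pvStep; simp; omega
        rw [htriple] at hq
        rw [hstep]
        rw [ih (if 1 - r > th then 1 - r else th) (b + (r - 1)) (r - 1) (q - 1) (s + (q - 1)) (by omega)]
        rw [htriple]
        apply Prod.ext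
        · simp; ring
        · simp; push_cast; ring
      · have hstep : pvStep (q, s) c = (q, s + q) := by
          unfold pvStep; simp [hplus, hminus]
        have htriple : pvTripleStep (th, b, r) c = (th, b + r, r) := by
          unfold pvTripleStep; simp [hplus, hminus]
        rw [htriple] at hq
        rw [hstep]
        rw [ih th (b + r) r q (s + q) (by omega)]
        rw [htriple]
        apply Prod.ext
        · simp
        · simp; push_cast; ring

-- closed form for R clamp-free periods with nonnegative drift
lemma runIter_closed (ops : List Char) :
    ∀ (R : Nat) (q s : Int),
      (ops.foldl pvTripleStep (0, 0, 0)).1 ≤ q → 0 ≤ (ops.foldl pvTripleStep (0, 0, 0)).2.2 →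
      runIter ops R (q, s)
        = (q + (R : Int) * (ops.foldl pvTripleStep (0, 0, 0)).2.2,
           s + (R : Int) * ((ops.length : Int) * q + (ops.foldl pvTripleStep (0, 0, 0)).2.1)
             + (ops.length : Int) * (ops.foldl pvTripleStep (0, 0, 0)).2.2 * triInt R) := by
  intro R
  induction R with
  | zero => intro q s _ _; simp [runIter, triInt]
  | succ R ih =>
    intro q s hq hd
    have hrun : pvRun ops q s
        = (q + ((ops.foldl pvTripleStep (0, 0, 0)).2.2 - 0),
           s + (q - 0) * ops.length + ((ops.foldl pvTripleStep (0, 0, 0)).2.1 - 0)) := by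
      unfold pvRun
      exact run_unclamped ops 0 0 0 q s (by omega)
    have : runIter ops (R + 1) (q, s) = runIter ops R (pvRun ops q s) := rfl
    rw [this, hrun, ih _ _ (by omega) hd]
    apply Prod.ext
    · simp; push_cast; ring
    · simp only []
      show _ = s + ((R : Int) + 1) * ((ops.length : Int) * q + _) + (ops.length : Int) * _ * triInt (R + 1)
      rw [show triInt (R + 1) = triInt R + R from rfl]
      push_cast; ring

lemma triInt_eq (R : Nat) : triInt R = PySem.Int.floordiv ((R : Int) * ((R : Int) - 1)) 2 := by
  rw [PySem.Int.floordiv_eq_ediv_of_pos (by norm_num)]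
  have h2 : (R : Int) * ((R : Int) - 1) = 2 * triInt R := by
    induction R with
    | zero => simp [triInt]
    | succ R ih => rw [show triInt (R + 1) = triInt R + R from rfl]; push_cast; push_cast at ih; nlinarith
  rw [h2, Int.mul_ediv_cancel_left _ (by norm_num)]

-- B's period loop plus fast-forward equals iterating whole periods
lemma loop_master (ops : List Char) (Lv K : Int) (hlen : (ops.length : Int) = Lv) :
    ∀ (n : Nat) (k p s : Int), k + (n : Int) = K →
      (let kps := pvPeriodLoop ops (ops.foldl pvTripleStep (0, 0, 0)).1
          (ops.foldl pvTripleStep (0, 0, 0)).2.2 K k p s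
       if kps.1 < K then
         (kps.2.1 + (K - kps.1) * (ops.foldl pvTripleStep (0, 0, 0)).2.2,
          kps.2.2 + (K - kps.1) * (Lv * kps.2.1 + (ops.foldl pvTripleStep (0, 0, 0)).2.1)
            + Lv * (ops.foldl pvTripleStep (0, 0, 0)).2.2
              * PySem.Int.floordiv ((K - kps.1) * ((K - kps.1) - 1)) 2)
       else (kps.2.1, kps.2.2))
      = runIter ops n (p, s) := by
  intro n
  induction n with
  | zero =>
    intro k p s hk
    have hkK : k = K := by omega
    rw [pvPeriodLoop]
    rw [dif_neg (by omega)]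
    simp only [runIter]
    rw [if_neg (by omega)]
  | succ n ih =>
    intro k p s hk
    have hkK : k < K := by omega
    by_cases hfast : (ops.foldl pvTripleStep (0, 0, 0)).1 ≤ p ∧ 0 ≤ (ops.foldl pvTripleStep (0, 0, 0)).2.2
    · rw [pvPeriodLoop]
      rw [dif_neg (by push_neg; intro _; exact ⟨hfast.1, hfast.2⟩)]
      simp only []
      rw [if_pos hkK]
      have hR : K - k = ((n : Int) + 1) := by omega
      have htri := triInt_eq (n + 1)
      push_cast at htri
      rw [hR, runIter_closed ops (n + 1) p s hfast.1 hfast.2, ← htri, hlen]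
      apply Prod.ext <;> (try simp) <;> (try push_cast) <;> (try ring)
    · rw [pvPeriodLoop]
      rw [dif_pos ⟨hkK, by
        push_neg
        intro h1
        rcases not_and_or.1 hfast with h | h
        · exact absurd h1 h
        · omega⟩]
      simp only []
      rw [ih (k + 1) (pvRun ops p s).1 (pvRun ops p s).2 (by push_cast; omega)]
      have : runIter ops (n + 1) (p, s) = runIter ops n (pvRun ops p s) := by
        show runIter ops n (pvRun ops p s) = _
        congr 1
      rw [this]

-- ===== VERDICT (by name: the statement is the Claim_ definition above) =====
theorem score_track_spec : Claim_equal_score_track := by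
  intro mt tr p l _ _
  unfold Spec_score_track
  by_cases htot : l * PySem.Str.len mt ≤ 0
  · rw [scoreA_eq]
    unfold score_track_alt
    dsimp only
    rw [if_pos htot, PySem.List.pyRange_one_eq_nil htot]
    rfl
  · -- main case: l * mtlen > 0
    have htot' : 0 < l * PySem.Str.len mt := by omega
    have hmnn : (0 : Int) ≤ PySem.Str.len mt := by rw [PySem.Str.len_eq]; positivity
    have htnn : (0 : Int) ≤ PySem.Str.len tr := by rw [PySem.Str.len_eq]; positivity
    have hm0 : 0 < PySem.Str.len mt := by
      rcases eq_or_lt_of_le hmnn with h | h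
      · rw [← h] at htot'; simp at htot'
      · exact h
    -- name the lcm value exactly as the port computes it
    set Lv : Int := if PySem.Str.len tr = 0 then PySem.Str.len mt
        else PySem.Int.floordiv (PySem.Str.len mt * PySem.Str.len tr) (pvGcdLoop (PySem.Str.len mt) (PySem.Str.len tr)) with hLvdef
    have hLfacts : 0 < Lv ∧ PySem.Str.len mt ∣ Lv
        ∧ (PySem.Str.len tr = 0 ∨ (0 < PySem.Str.len tr ∧ PySem.Str.len tr ∣ Lv)) := by
      by_cases htr : PySem.Str.len tr = 0
      · rw [hLvdef, if_pos htr]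
        exact ⟨hm0, dvd_refl _, Or.inl htr⟩
      · have htr0 : 0 < PySem.Str.len tr := lt_of_le_of_ne htnn (Ne.symm htr)
        rw [hLvdef, if_neg htr]
        rw [PySem.Str.len_eq, PySem.Str.len_eq]
        rw [gcdLoop_natCast, show ((mt.toList.length : Int) * (tr.toList.length : Int)) = ((mt.toList.length * tr.toList.length : Nat) : Int) by push_cast; ring]
        rw [PySem.Int.floordiv_natCast]
        have hlcm : mt.toList.length * tr.toList.length / Nat.gcd mt.toList.length tr.toList.length
            = Nat.lcm mt.toList.length tr.toList.length := rfl
        rw [hlcm]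
        have hmN : 0 < mt.toList.length := by rw [PySem.Str.len_eq] at hm0; exact_mod_cast hm0
        have htN : 0 < tr.toList.length := by rw [PySem.Str.len_eq] at htr0; exact_mod_cast htr0
        refine ⟨by exact_mod_cast Nat.lcm_pos hmN htN, ?_, Or.inr ⟨by exact_mod_cast htN, ?_⟩⟩
        · exact_mod_cast Int.natCast_dvd_natCast.mpr (Nat.dvd_lcm_left _ _)
        · exact_mod_cast Int.natCast_dvd_natCast.mpr (Nat.dvd_lcm_right _ _)
    obtain ⟨hLpos, hmdvd, htcond⟩ := hLfacts
    set K : Int := PySem.Int.floordiv (l * PySem.Str.len mt) Lv with hKdef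
    set rem : Int := PySem.Int.mod (l * PySem.Str.len mt) Lv with hremdef
    have hLne : Lv ≠ 0 := by omega
    have hdm : PySem.Int.divmod? (l * PySem.Str.len mt) Lv = some (K, rem) := by
      simp [PySem.Int.divmod?, PySem.Int.floordiv, PySem.Int.mod, hLne, hKdef, hremdef]
    have hKnn : 0 ≤ K := by
      rw [hKdef]
      exact (PySem.Int.le_floordiv_iff_mul_le hLpos).2 (by omega)
    have htotal : K * Lv + rem = l * PySem.Str.len mt := PySem.Int.floordiv_mul_add_mod _ Lv
    have hremnn : 0 ≤ rem := PySem.Int.mod_nonneg _ hLpos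
    have hremlt : rem < Lv := PySem.Int.mod_lt _ hLpos
    set opsv := (PySem.List.pyRange 0 Lv 1).map (opAt mt tr) with hopsdef
    have hlen : (opsv.length : Int) = Lv := by
      rw [hopsdef]
      simp [PySem.List.length_pyRange_one]
      omega
    -- A reduced to K.toNat full periods followed by the remainder
    rw [scoreA_eq]
    have hKcast : ((K.toNat : Int)) = K := Int.toNat_of_nonneg hKnn
    have hsplitN : l * PySem.Str.len mt = (K.toNat : Int) * Lv + rem := by
      rw [hKcast]; linarith [htotal]
    rw [hsplitN, run_chunks mt tr Lv hm0 hLpos hmdvd htcond K.toNat rem (p, 0) hremnn]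
    -- B reduced to the same shape
    unfold score_track_alt
    dsimp only
    rw [if_neg (by omega)]
    have hops : ((PySem.List.pyRange 0 Lv 1).foldl (fun acc i =>
        let c := (PySem.Str.pyGet? mt (PySem.Int.mod i (PySem.Str.len mt))).getD ' '
        let c := if c = 'S' ∨ c = '=' then (PySem.Str.pyGet? tr (PySem.Int.mod i (PySem.Str.len tr))).getD ' ' else c
        acc ++ [c]) []) = opsv := by
      rw [PySem.List.foldl_append_singleton_eq_map (fun i =>
        let c := (PySem.Str.pyGet? mt (PySem.Int.mod i (PySem.Str.len mt))).getD ' '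
        if c = 'S' ∨ c = '=' then (PySem.Str.pyGet? tr (PySem.Int.mod i (PySem.Str.len tr))).getD ' ' else c)]
      rw [List.nil_append]
      rfl
    rw [hops, hdm]
    simp only [Option.getD_some]
    have hmaster := loop_master opsv Lv K hlen K.toNat 0 p 0 (by rw [hKcast]; ring)
    dsimp only at hmaster
    rw [hmaster]
    have hslice : PySem.List.slice opsv none (some rem) = (PySem.List.pyRange 0 rem 1).map (opAt mt tr) := by
      rw [PySem.List.slice_to _ hremnn]
      rw [hopsdef, PySem.List.pyRange_one_append 0 rem Lv hremnn (le_of_lt hremlt), List.map_append]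
      apply List.take_left'
      simp [PySem.List.length_pyRange_one]
    rw [hslice, pvRun_eta]
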